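-- pv_equiv track=rewrite | github.com/thehalleyyoung/deppy | src/deppy/hybrid/pipeline/stages.py | _suggest_tactic
-- ===== SOURCE A (Python) =====
-- from typing import (
--
--     Any,
--     Callable,
--     Dict,
--     FrozenSet,
--     List,
--     Optional,
--     Sequence,
--     Set,
--     Tuple,
--     Union,
-- )
--
-- def _suggest_tactic(
--
--     obligation: Dict[str, Any],
-- ) -> Optional[str]:
--     """Suggest a Lean tactic for the obligation."""
--     desc = obligation.get("description", "").lower()
--     spec_id = obligation.get("spec_id", "")
--
--     if any(w in desc for w in ("sort", "order", "monoton")):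
--         return "by simp [List.Sorted]"
--
--     if any(w in desc for w in ("type", "int", "nat", "bool")):
--         return "by decide"
--
--     if any(w in desc for w in ("arith", "sum", "product", "greater", "less")):
--         return "by omega"
--
--     return None
-- ===== SOURCE B (Python) =====
-- # One character-by-character sweep over the description: at each position, record the
-- # best (lowest) rule rank whose keyword starts there; map the final rank to its tactic.
-- _RANKED_KEYWORDS = [
--     ("sort", 0), ("order", 0), ("monoton", 0),
--     ("type", 1), ("int", 1), ("nat", 1), ("bool", 1),
--     ("arith", 2), ("sum", 2), ("product", 2), ("greater", 2), ("less", 2),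
-- ]
-- _TACTICS = ["by simp [List.Sorted]", "by decide", "by omega"]
--
-- def _suggest_tactic(obligation):
--     desc = obligation.get("description", "").lower()
--     best = len(_TACTICS)
--     for i in range(len(desc)):
--         for word, rank in _RANKED_KEYWORDS:
--             if rank < best and desc.startswith(word, i):
--                 best = rank
--     return _TACTICS[best] if best < len(_TACTICS) else None
-- ===== Notes on version B (the rewrite author's own statement) =====
-- stated objective: alternative
-- what changed: Instead of A's three staged substring searches (one fresh scan of desc per keyword group, stopping at the first matching group), B makes a single character-position sweep over the lowered description, keeping the lowest rule rank of any keyword that starts at the current position, and maps the final rank to its tactic.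
import Mathlib
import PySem

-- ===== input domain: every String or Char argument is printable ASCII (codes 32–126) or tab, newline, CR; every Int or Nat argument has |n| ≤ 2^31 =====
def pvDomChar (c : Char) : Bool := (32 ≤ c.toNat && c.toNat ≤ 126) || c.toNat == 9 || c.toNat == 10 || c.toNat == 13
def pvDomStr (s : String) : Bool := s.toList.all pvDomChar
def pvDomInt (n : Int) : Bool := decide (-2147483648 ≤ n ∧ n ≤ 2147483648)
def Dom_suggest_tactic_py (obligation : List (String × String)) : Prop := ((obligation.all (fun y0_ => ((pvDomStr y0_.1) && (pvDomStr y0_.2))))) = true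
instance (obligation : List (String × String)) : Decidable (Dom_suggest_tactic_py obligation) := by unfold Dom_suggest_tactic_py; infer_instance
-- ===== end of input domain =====

-- B replaces A's three keyword-group branches (each a fresh substring search over desc)
-- by ONE character-position sweep over desc that keeps the best (lowest) rank of any
-- keyword starting at the current position, then maps the final rank to its tactic (alternative).

-- ===== PORT A =====
def suggest_tactic_py (obligation : List (String × String)) : Option String :=
  let desc := PySem.Str.lower (PySem.Dict.getD (PySem.Dict.mk obligation) "description" "")
  let _spec_id := PySem.Dict.getD (PySem.Dict.mk obligation) "spec_id" ""
  if ["sort", "order", "monoton"].any (fun w => PySem.Str.isIn w desc) then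
    some "by simp [List.Sorted]"
  else if ["type", "int", "nat", "bool"].any (fun w => PySem.Str.isIn w desc) then
    some "by decide"
  else if ["arith", "sum", "product", "greater", "less"].any (fun w => PySem.Str.isIn w desc) then
    some "by omega"
  else
    none

-- ===== PORT B =====
def pvRankedKeywords : List (List Char × Nat) :=
  [("sort".toList, 0), ("order".toList, 0), ("monoton".toList, 0),
   ("type".toList, 1), ("int".toList, 1), ("nat".toList, 1), ("bool".toList, 1),
   ("arith".toList, 2), ("sum".toList, 2), ("product".toList, 2), ("greater".toList, 2), ("less".toList, 2)]

def pvTactics : List String := ["by simp [List.Sorted]", "by decide", "by omega"]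

-- the position sweep: at each suffix, fold over the ranked keywords updating `best`
def pvScan : List Char → Nat → Nat
  | [], best => best
  | c :: rest, best =>
      pvScan rest (pvRankedKeywords.foldl
        (fun b wr => if wr.2 < b ∧ wr.1.isPrefixOf (c :: rest) then wr.2 else b) best)

def suggest_tactic_py_alt (obligation : List (String × String)) : Option String :=
  let desc := PySem.Str.lower (PySem.Dict.getD (PySem.Dict.mk obligation) "description" "")
  let best := pvScan desc.toList pvTactics.length
  if best < pvTactics.length then pvTactics[best]? else none

-- ===== PRECONDITION & SPEC =====
def Spec_suggest_tactic_py (obligation : List (String × String)) (out : Option String) : Prop := out = suggest_tactic_py_alt obligation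
instance (obligation : List (String × String)) (out : Option String) : Decidable (Spec_suggest_tactic_py obligation out) := by unfold Spec_suggest_tactic_py; infer_instance

-- ===== CLAIM (what is proved, stated in full; the proofs are below) =====
def Claim_equal_suggest_tactic_py : Prop := ∀ (obligation : List (String × String)), Dom_suggest_tactic_py obligation → Spec_suggest_tactic_py obligation (suggest_tactic_py obligation)

-- ===== LEMMAS AND PROOFS =====

-- the inner fold lowers `best` exactly to the least rank of a keyword that is a prefix of t
theorem pv_fold_iff (ks : List (List Char × Nat)) (b r : Nat) (t : List Char) :
    (ks.foldl (fun b wr => if wr.2 < b ∧ wr.1.isPrefixOf t then wr.2 else b) b ≤ r)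
    ↔ b ≤ r ∨ ∃ wr ∈ ks, wr.2 ≤ r ∧ wr.1 <+: t := by
  induction ks generalizing b with
  | nil => simp
  | cons h ks ih =>
    simp only [List.foldl_cons, ih, List.mem_cons]
    by_cases hp : h.1 <+: t
    · by_cases hb : h.2 < b
      · rw [if_pos ⟨hb, List.isPrefixOf_iff_prefix.mpr hp⟩]
        constructor
        · rintro (h2 | e)
          · exact Or.inr ⟨h, Or.inl rfl, h2, hp⟩
          · exact Or.inr (by rcases e with ⟨wr, hm, hw⟩; exact ⟨wr, Or.inr hm, hw⟩)
        · rintro (hbr | ⟨wr, (rfl | hm), hw⟩)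
          · exact Or.inl (le_trans (le_of_lt hb) hbr)
          · exact Or.inl hw.1
          · exact Or.inr ⟨wr, hm, hw⟩
      · rw [if_neg (by intro hc; exact hb hc.1)]
        constructor
        · rintro (h2 | e)
          · exact Or.inl h2
          · exact Or.inr (by rcases e with ⟨wr, hm, hw⟩; exact ⟨wr, Or.inr hm, hw⟩)
        · rintro (hbr | ⟨wr, (rfl | hm), hw⟩)
          · exact Or.inl hbr
          · exact Or.inl (le_trans (Nat.le_of_not_lt hb) hw.1)
          · exact Or.inr ⟨wr, hm, hw⟩
    · rw [if_neg (by intro hc; exact hp (List.isPrefixOf_iff_prefix.mp hc.2))]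
      constructor
      · rintro (h2 | e)
        · exact Or.inl h2
        · exact Or.inr (by rcases e with ⟨wr, hm, hw⟩; exact ⟨wr, Or.inr hm, hw⟩)
      · rintro (hbr | ⟨wr, (rfl | hm), hw⟩)
        · exact Or.inl hbr
        · exact absurd hw.2 hp
        · exact Or.inr ⟨wr, hm, hw⟩

-- the sweep lowers `best` exactly to the least rank of a keyword that is an infix of l
theorem pv_scan_iff (l : List Char) (b r : Nat) :
    pvScan l b ≤ r ↔ b ≤ r ∨ ∃ wr ∈ pvRankedKeywords, wr.2 ≤ r ∧ wr.1 <:+: l := by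
  induction l generalizing b with
  | nil =>
    simp only [pvScan]
    constructor
    · exact Or.inl
    · rintro (hbr | ⟨wr, hm, _, hw⟩)
      · exact hbr
      · exact absurd (List.eq_nil_of_infix_nil hw) (by
          revert hm; simp [pvRankedKeywords]; rintro (h|h|h|h|h|h|h|h|h|h|h|h) <;> simp [h])
  | cons c rest ih =>
    simp only [pvScan, ih, pv_fold_iff]
    constructor
    · rintro ((hbr | ⟨wr, hm, hw, hp⟩) | ⟨wr, hm, hw, hi⟩)
      · exact Or.inl hbr
      · exact Or.inr ⟨wr, hm, hw, hp.isInfix⟩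
      · exact Or.inr ⟨wr, hm, hw, List.infix_cons_iff.mpr (Or.inr hi)⟩
    · rintro (hbr | ⟨wr, hm, hw, hi⟩)
      · exact Or.inl (Or.inl hbr)
      · rcases (List.infix_cons_iff).mp hi with hp | hi2
        · exact Or.inl (Or.inr ⟨wr, hm, hw, hp⟩)
        · exact Or.inr ⟨wr, hm, hw, hi2⟩

-- the if-chain of A, on the lowered description as a char list, equals B's table lookup
theorem pv_main (L : List Char) :
    (if (['s','o','r','t'] <:+: L ∨ ['o','r','d','e','r'] <:+: L ∨ ['m','o','n','o','t','o','n'] <:+: L) then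
        some "by simp [List.Sorted]"
      else if (['t','y','p','e'] <:+: L ∨ ['i','n','t'] <:+: L ∨ ['n','a','t'] <:+: L ∨ ['b','o','o','l'] <:+: L) then
        some "by decide"
      else if (['a','r','i','t','h'] <:+: L ∨ ['s','u','m'] <:+: L ∨ ['p','r','o','d','u','c','t'] <:+: L ∨ ['g','r','e','a','t','e','r'] <:+: L ∨ ['l','e','s','s'] <:+: L) then
        some "by omega"
      else (none : Option String))
    = (if pvScan L 3 < 3 then pvTactics[pvScan L 3]? else none) := by
  have h0 := pv_scan_iff L 3 0
  have h1 := pv_scan_iff L 3 1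
  have h2 := pv_scan_iff L 3 2
  have h3 : pvScan L 3 ≤ 3 := (pv_scan_iff L 3 3).mpr (Or.inl le_rfl)
  simp only [pvRankedKeywords] at h0 h1 h2
  simp at h0 h1 h2
  set Q := pvScan L 3 with hQ
  clear_value Q
  interval_cases Q
  · rw [if_pos (h0.mp rfl)]; decide
  · have nd0 : ¬(['s','o','r','t'] <:+: L ∨ ['o','r','d','e','r'] <:+: L ∨ ['m','o','n','o','t','o','n'] <:+: L) := fun h => by have := h0.mpr h; omega
    rw [if_neg nd0, if_pos (by
      rcases h1.mp (by norm_num) with h|h|h|hb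
      · exact absurd (Or.inl h) nd0
      · exact absurd (Or.inr (Or.inl h)) nd0
      · exact absurd (Or.inr (Or.inr h)) nd0
      · exact hb)]
    decide
  · have nd0 : ¬(['s','o','r','t'] <:+: L ∨ ['o','r','d','e','r'] <:+: L ∨ ['m','o','n','o','t','o','n'] <:+: L) := fun h => by have := h0.mpr h; omega
    have nd1 : ¬(['t','y','p','e'] <:+: L ∨ ['i','n','t'] <:+: L ∨ ['n','a','t'] <:+: L ∨ ['b','o','o','l'] <:+: L) := fun h => by
      have := h1.mpr (Or.inr (Or.inr (Or.inr h))); omega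
    rw [if_neg nd0, if_neg nd1, if_pos (by
      rcases h2.mp (by norm_num) with h|h|h|h|h|h|h|hc
      · exact absurd (Or.inl h) nd0
      · exact absurd (Or.inr (Or.inl h)) nd0
      · exact absurd (Or.inr (Or.inr h)) nd0
      · exact absurd (Or.inl h) nd1
      · exact absurd (Or.inr (Or.inl h)) nd1
      · exact absurd (Or.inr (Or.inr (Or.inl h))) nd1
      · exact absurd (Or.inr (Or.inr (Or.inr h))) nd1
      · exact hc)]
    decide
  · have nd0 : ¬(['s','o','r','t'] <:+: L ∨ ['o','r','d','e','r'] <:+: L ∨ ['m','o','n','o','t','o','n'] <:+: L) := fun h => by have := h0.mpr h; omega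
    have nd1 : ¬(['t','y','p','e'] <:+: L ∨ ['i','n','t'] <:+: L ∨ ['n','a','t'] <:+: L ∨ ['b','o','o','l'] <:+: L) := fun h => by
      have := h1.mpr (Or.inr (Or.inr (Or.inr h))); omega
    have nd2 : ¬(['a','r','i','t','h'] <:+: L ∨ ['s','u','m'] <:+: L ∨ ['p','r','o','d','u','c','t'] <:+: L ∨ ['g','r','e','a','t','e','r'] <:+: L ∨ ['l','e','s','s'] <:+: L) := fun h => by
      have := h2.mpr (Or.inr (Or.inr (Or.inr (Or.inr (Or.inr (Or.inr (Or.inr h))))))); omega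
    rw [if_neg nd0, if_neg nd1, if_neg nd2]; simp

-- ===== VERDICT (by name: the statement is the Claim_ definition above) =====
theorem suggest_tactic_py_spec : Claim_equal_suggest_tactic_py := by
  intro ob _
  unfold Spec_suggest_tactic_py suggest_tactic_py suggest_tactic_py_alt
  set desc := PySem.Str.lower (PySem.Dict.getD (PySem.Dict.mk ob) "description" "") with hdesc
  simp only [List.any_cons, List.any_nil, Bool.or_eq_true, PySem.Str.isIn_iff_infix, pvTactics]
  simp only [List.length_cons, List.length_nil]
  norm_num
  exact pv_main desc.toList
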